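-- pv_equiv track=rewrite | github.com/adriaan29A/wordle-sidekick | tools.py | verify_pattern
-- ===== SOURCE A (Python) =====
-- class Hint:
--     miss    = 'b'
--     hit     = 'g'
--     other   = 'y'
--
-- def generate_pattern(source, target):
--     """
--     The one true Wordle algorithm
--
--
--     """
--
--     n = len(source)
--     pattern = [' '] * n
--
--     s = source
--     t = target
--
--     for i in range(n):
--
--         if s[i] == t[i]:
--             pattern[i] = Hint.hit
--             s = (s[0:i] + ' ' + s[i+1:])
--             t = (t[0:i] + ' ' + t[i+1:])
--
--     for i in range(n):
--         if s[i] != ' ':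
--             idx = t.find(s[i])
--             if idx != -1:
--                 pattern[i] = Hint.other
--                 t = (t[:idx] + ' ' + t[idx+1:])
--             else:
--                 pattern[i] = Hint.miss
--
--     res = ''
--     for i in range(n):
--         res = res + pattern[i]
--
--     return res
--
-- def verify_pattern(pattern, source, target):
--     """
--
--
--
--     """
--     res = True
--     p = generate_pattern(source, target)
--
--     for i in range(len(p)):
--         if pattern[i] != p[i]: #fix
--             res = False
--             break
--
--     return res
-- ===== SOURCE B (Python) =====
-- def verify_pattern(pattern, source, target):
--     # Declarative check: never builds the expected pattern or simulates the
--     # marking loop.  Validate each position's hint class directly (green iff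
--     # exact match, otherwise 'y'/'b'), grouping the y/b hints of each source
--     # letter; then check the per-letter law of Wordle hints: within a letter's
--     # occurrences the hints must be 'y' on the first min(quota, k) of them and
--     # 'b' on the rest, where quota is the letter's count among the target
--     # positions not consumed by an exact match.
--     n = len(source)
--     quota = {}
--     for j in range(len(target)):
--         if j >= n or source[j] != target[j]:
--             quota[target[j]] = quota.get(target[j], 0) + 1
--     runs = {}
--     for i in range(n):
--         h = pattern[i]
--         if source[i] == target[i]:
--             if h != 'g':
--                 return False
--         else:
--             if h != 'y' and h != 'b':
--                 return False
--             runs.setdefault(source[i], []).append(h)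
--     for c in runs:
--         hints = runs[c]
--         m = min(quota.get(c, 0), len(hints))
--         if hints != ['y'] * m + ['b'] * (len(hints) - m):
--             return False
--     return True
-- ===== Notes on version B (the rewrite author's own statement) =====
-- stated objective: faster
-- what changed: Replaces A's simulate-and-compare (generate the expected pattern by repeatedly blanking and re-searching strings, then compare) by a declarative validity check that never builds the expected pattern: per-position hint-class checks plus a per-letter law (each letter's y/b hints must be 'y' on the first min(quota,k) occurrences), with quota = the letter's count among target positions not consumed by an exact match.
-- outside the precondition, e.g. on verify_pattern('b', ' ', 'x'): A returns False, B returns True; on verify_pattern('y', 'ab', 'cd'): A returns False, B raises IndexError; on verify_pattern('b', 'aa', 'bb'): A raises IndexError, B raises IndexError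
import Mathlib
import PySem

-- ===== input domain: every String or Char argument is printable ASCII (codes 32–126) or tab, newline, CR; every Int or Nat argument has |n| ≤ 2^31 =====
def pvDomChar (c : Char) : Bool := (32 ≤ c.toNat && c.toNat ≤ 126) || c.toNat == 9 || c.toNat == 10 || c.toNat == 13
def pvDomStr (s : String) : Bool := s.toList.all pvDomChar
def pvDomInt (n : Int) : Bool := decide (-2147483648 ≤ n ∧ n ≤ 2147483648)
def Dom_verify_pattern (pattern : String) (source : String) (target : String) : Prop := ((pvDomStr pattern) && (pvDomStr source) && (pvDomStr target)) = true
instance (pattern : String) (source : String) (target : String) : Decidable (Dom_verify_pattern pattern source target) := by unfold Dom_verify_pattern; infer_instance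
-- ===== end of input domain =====

-- B replaces A's simulate-and-compare (generate the expected pattern by repeatedly blanking and
-- re-searching strings, then compare) by a declarative check that never builds the expected
-- pattern: per-position hint-class checks plus a per-letter counting law (faster, asymptotic).

-- ===== PORT A =====
-- Python strings are ported as List Char internally; where Python would raise IndexError
-- (reading t[i] / pattern[i] out of range) the port uses the total pyGetD/pySetD forms —
-- exactly those inputs are excluded by Pre_verify_pattern below.

-- one iteration of generate_pattern's first loop: state (pattern, s, t)
def pvGen1Step (st : List Char × List Char × List Char) (i : Int) :
    List Char × List Char × List Char :=
  if PySem.List.pyGetD st.2.1 i ' ' == PySem.List.pyGetD st.2.2 i ' ' then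
    (PySem.List.pySetD st.1 i 'g',
     PySem.List.slice st.2.1 (some 0) (some i) ++ [' '] ++ PySem.List.slice st.2.1 (some (i+1)) none,
     PySem.List.slice st.2.2 (some 0) (some i) ++ [' '] ++ PySem.List.slice st.2.2 (some (i+1)) none)
  else st

-- one iteration of the second loop: s is fixed, state (pattern, t)
def pvGen2Step (s : List Char) (st : List Char × List Char) (i : Int) :
    List Char × List Char :=
  let c := PySem.List.pyGetD s i ' '
  if c ≠ ' ' then
    let idx := PySem.Chars.find st.2 [c]
    if idx ≠ -1 then
      (PySem.List.pySetD st.1 i 'y',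
       PySem.List.slice st.2 none (some idx) ++ [' '] ++ PySem.List.slice st.2 (some (idx+1)) none)
    else (PySem.List.pySetD st.1 i 'b', st.2)
  else st

def generate_pattern (source target : String) : List Char :=
  let n : Int := (source.toList.length : Int)
  let pattern0 := PySem.List.pyRepeat [' '] n
  let st1 := (PySem.List.pyRange 0 n 1).foldl pvGen1Step (pattern0, source.toList, target.toList)
  let st2 := (PySem.List.pyRange 0 n 1).foldl (pvGen2Step st1.2.1) (st1.1, st1.2.2)
  (PySem.List.pyRange 0 n 1).foldl (fun r i => r ++ [PySem.List.pyGetD st2.1 i ' ']) []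

-- verify_pattern's loop with its break
def pvVerifyLoop (pattern p : List Char) : List Int → Bool
  | [] => true
  | i :: rest =>
    if PySem.List.pyGetD pattern i ' ' ≠ PySem.List.pyGetD p i ' ' then false
    else pvVerifyLoop pattern p rest

def verify_pattern (pattern : String) (source : String) (target : String) : Bool :=
  let p := generate_pattern source target
  pvVerifyLoop pattern.toList p (PySem.List.pyRange 0 (p.length : Int) 1)

-- ===== PORT B =====
-- Source B's first loop: letters of the target not consumed by an exact match
def pvQuotaStep (s t : List Char) (n : Int) (q : PySem.Dict Char Int) (j : Int) :
    PySem.Dict Char Int :=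
  if (decide (n ≤ j) || !(PySem.List.pyGetD s j ' ' == PySem.List.pyGetD t j ' ')) then
    q.insert (PySem.List.pyGetD t j ' ') (q.getD (PySem.List.pyGetD t j ' ') 0 + 1)
  else q

-- Source B's second loop with its early returns: positional hint-class checks, and the
-- y/b hints of each source letter collected in source order (runs.setdefault(...).append(h))
def pvRunsLoop (pat s t : List Char) :
    PySem.Dict Char (List Char) → List Int → Option (PySem.Dict Char (List Char))
  | runs, [] => some runs
  | runs, i :: rest =>
    let h := PySem.List.pyGetD pat i ' '
    if PySem.List.pyGetD s i ' ' == PySem.List.pyGetD t i ' ' then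
      if h ≠ 'g' then none else pvRunsLoop pat s t runs rest
    else
      if h ≠ 'y' ∧ h ≠ 'b' then none
      else pvRunsLoop pat s t
             (runs.modify (PySem.List.pyGetD s i ' ') [] (· ++ [h])) rest

-- Source B's third loop: within each letter the hints must be 'y' * min(quota, k) ++ 'b' * rest
def pvLawLoop (quota : PySem.Dict Char Int) (runs : PySem.Dict Char (List Char)) :
    List Char → Bool
  | [] => true
  | c :: cs =>
    let hints := runs.getD c []
    let m := min (quota.getD c 0) ((hints.length : Int))
    if hints ≠ List.replicate m.toNat 'y'
                  ++ List.replicate (((hints.length : Int)) - m).toNat 'b' then false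
    else pvLawLoop quota runs cs

def verify_pattern_alt (pattern : String) (source : String) (target : String) : Bool :=
  let n : Int := (source.toList.length : Int)
  let quota := (PySem.List.pyRange 0 (target.toList.length : Int) 1).foldl
      (pvQuotaStep source.toList target.toList n) PySem.Dict.empty
  match pvRunsLoop pattern.toList source.toList target.toList PySem.Dict.empty
      (PySem.List.pyRange 0 n 1) with
  | none => false
  | some runs => pvLawLoop quota runs runs.keys

-- ===== PRECONDITION & SPEC =====
-- Pre_ excludes: sources containing the blank sentinel ' ' (A's hint there is an accident of
-- its blanking scheme); targets shorter than the source (A raises IndexError); and patterns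
-- shorter than the source with no position that visibly forces a mismatch (a non-'bgy'
-- character, or a 'g'/non-'g' disagreeing with whether that position is an exact hit) —
-- on those A raises IndexError whenever the pattern matches the generated prefix, and the
-- exact crash condition is not closed-form.
def Pre_verify_pattern (pattern : String) (source : String) (target : String) : Prop :=
  ' ' ∉ source.toList ∧ source.toList.length ≤ target.toList.length ∧
  (source.toList.length ≤ pattern.toList.length ∨
    ∃ i < pattern.toList.length,
      pattern.toList.getD i ' ' ∉ (['b', 'g', 'y'] : List Char) ∨
      (pattern.toList.getD i ' ' = 'g' ∧
        source.toList.getD i ' ' ≠ target.toList.getD i ' ') ∨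
      (pattern.toList.getD i ' ' ≠ 'g' ∧
        source.toList.getD i ' ' = target.toList.getD i ' '))
instance (pattern : String) (source : String) (target : String) :
    Decidable (Pre_verify_pattern pattern source target) := by
  unfold Pre_verify_pattern; infer_instance

def pvWitness_verify_pattern : String × String × String := ("yyb", "abc", "bca")

def Spec_verify_pattern (pattern : String) (source : String) (target : String) (out : Bool) : Prop :=
  out = verify_pattern_alt pattern source target
instance (pattern : String) (source : String) (target : String) (out : Bool) :
    Decidable (Spec_verify_pattern pattern source target out) := by
  unfold Spec_verify_pattern; infer_instance

-- ===== CLAIM (what is proved, stated in full; the proofs are below) =====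
def Claim_equal_verify_pattern : Prop := ∀ (pattern : String) (source : String) (target : String), Dom_verify_pattern pattern source target → Pre_verify_pattern pattern source target → Spec_verify_pattern pattern source target (verify_pattern pattern source target)

-- ===== LEMMAS AND PROOFS =====

-- proof-side reference notions
def pvHit (s t : List Char) (j : Nat) : Bool := s.getD j ' ' == t.getD j ' '
def pvS1 (s t : List Char) (k j : Nat) : Char := if j < k ∧ pvHit s t j then ' ' else s.getD j ' '
def pvT1 (s t : List Char) (k j : Nat) : Char := if j < k ∧ pvHit s t j then ' ' else t.getD j ' '
def pvP1 (s t : List Char) (k j : Nat) : Char := if j < k ∧ pvHit s t j then 'g' else ' '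

-- non-green occurrence of the letter c at source position j
def pvNG (s t : List Char) (c : Char) (j : Nat) : Bool :=
  !(pvHit s t j) && (s.getD j ' ' == c)

-- quota of a letter: its count among target positions not consumed by an exact match
def pvQ (s t : List Char) (c : Char) : Int :=
  (((List.range t.length).countP (fun j =>
      (decide (s.length ≤ j) || !(s.getD j ' ' == t.getD j ' ')) && (t.getD j ' ' == c))) : Int)

-- the y/b hints of letter c among the first m source positions, in order
def pvRun (pat s t : List Char) (m : Nat) (c : Char) : List Char :=
  ((List.range m).filter (pvNG s t c)).map (fun j => pat.getD j ' ')

-- positional hint-class check of Source B's second loop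
def pvPosOK (pat s t : List Char) (i : Nat) : Bool :=
  if pvHit s t i then pat.getD i ' ' == 'g'
  else (pat.getD i ' ' == 'y' || pat.getD i ' ' == 'b')

-- the hint A's algorithm assigns at position i, in closed form
def pvExpChar (s t : List Char) (i : Nat) : Char :=
  if pvHit s t i then 'g'
  else if (((List.range (i+1)).countP (pvNG s t (s.getD i ' '))) : Int)
          ≤ pvQ s t (s.getD i ' ') then 'y' else 'b'

-- the expected-hint stream: mirrors A's second loop (find-and-blank)
def pvExpected : List Char → List Char → List Char
  | [], _ => []
  | c :: rest, t =>
    if c = ' ' then 'g' :: pvExpected rest t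
    else
      let idx := PySem.Chars.find t [c]
      if idx ≠ -1 then 'y' :: pvExpected rest (t.set idx.toNat ' ')
      else 'b' :: pvExpected rest t

-- compare pattern (indexed from k) against a stream of expected hints, stopping at the first mismatch
def pvCmp (pat : List Char) : Int → List Char → Bool
  | _, [] => true
  | k, x :: rest => if PySem.List.pyGetD pat k ' ' ≠ x then false else pvCmp pat (k+1) rest

lemma pvGetD_set (l : List Char) (n : Nat) (a d : Char) (j : Nat) :
    (l.set n a).getD j d = if n = j ∧ n < l.length then a else l.getD j d := by
  simp only [List.getD_eq_getElem?_getD, List.getElem?_set]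
  split
  · rename_i h; split <;> simp_all
  · simp_all

lemma pvCount_set (l : List Char) (i : Nat) (h : i < l.length) (x : Char) (hx : x ≠ ' ') :
    (((l.set i ' ').count x : Int)) = (l.count x : Int) - (if l.getD i ' ' = x then 1 else 0) := by
  rw [List.count_set h, List.getD_eq_getElem?_getD, List.getElem?_eq_getElem h]
  have hmem : l[i] ∈ l := List.getElem_mem h
  by_cases hc : l[i] = x
  · have : 1 ≤ l.count x := List.count_pos_iff.mpr (hc ▸ hmem)
    simp [hc, Ne.symm hx]
    omega
  · simp [hc, Ne.symm hx, beq_iff_eq]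

lemma pvFind_spec (c : Char) (t : List Char) (h : PySem.Chars.find t [c] ≠ -1) :
    0 ≤ PySem.Chars.find t [c] ∧ (PySem.Chars.find t [c]).toNat < t.length ∧
      t.getD (PySem.Chars.find t [c]).toNat ' ' = c := by
  have h0 : 0 ≤ PySem.Chars.find t [c] := by
    have := PySem.Chars.neg_one_le_find (s := t) (sub := [c]); omega
  obtain ⟨rest, hr⟩ := (PySem.Chars.find_spec (s := t) (sub := [c]) h0).1
  have hne : t.drop (PySem.Chars.find t [c]).toNat ≠ [] := by
    intro hh; rw [hh] at hr; simp at hr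
  have hlt : (PySem.Chars.find t [c]).toNat < t.length := by
    rw [← List.length_pos_iff_ne_nil, List.length_drop] at hne; omega
  refine ⟨h0, hlt, ?_⟩
  rw [List.drop_eq_getElem_cons hlt] at hr
  injection hr with h1 h2
  rw [List.getD_eq_getElem?_getD, List.getElem?_eq_getElem hlt]; exact h1.symm

lemma pvFind_none (c : Char) (t : List Char) : PySem.Chars.find t [c] = -1 ↔ c ∉ t := by
  rw [PySem.Chars.find_eq_neg_one_iff, List.singleton_infix_iff]

-- A's inline slice-blanking is List.set
lemma pvBlank_eq_set (l : List Char) (i : Int) (h0 : 0 ≤ i) (hlt : i.toNat < l.length) :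
    PySem.List.slice l none (some i) ++ [' '] ++ PySem.List.slice l (some (i+1)) none
      = l.set i.toNat ' ' := by
  rw [PySem.List.slice_to l h0, PySem.List.slice_from l (by omega),
      List.set_eq_take_cons_drop _ hlt]
  have hi : (i + 1).toNat = i.toNat + 1 := by omega
  simp [hi]

lemma pvExpected_length (sl t : List Char) : (pvExpected sl t).length = sl.length := by
  induction sl generalizing t with
  | nil => rfl
  | cons c rest ih =>
    simp only [pvExpected]
    split
    · simp [ih]
    · split <;> simp [ih]

-- ===== phase 1: characterisation of A's first loop =====
-- ===== phase 2, A side: the second loop writes the expected stream =====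
-- ===== phase 1: characterisation of A's first loop =====
lemma pvPhase1 (s t : List Char) (hlen : s.length ≤ t.length) :
    ∀ (k : Nat), k ≤ s.length →
    ∀ (A : List Char × List Char × List Char),
    A = (PySem.List.pyRange 0 (k : Int) 1).foldl pvGen1Step
          (List.replicate s.length ' ', s, t) →
    A.1.length = s.length ∧ A.2.1.length = s.length ∧ A.2.2.length = t.length ∧
    (∀ j, A.1.getD j ' ' = pvP1 s t k j) ∧
    (∀ j, A.2.1.getD j ' ' = pvS1 s t k j) ∧
    (∀ j, A.2.2.getD j ' ' = pvT1 s t k j) := by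
  intro k
  induction k with
  | zero =>
    intro _ A hA
    rw [PySem.List.pyRange_one_eq_nil (by simp), List.foldl_nil] at hA
    subst hA
    refine ⟨by simp, rfl, rfl, ?_, ?_, ?_⟩
    · intro j; simp [pvP1, List.getD_eq_getElem?_getD, List.getElem?_replicate]
      split <;> rfl
    · intro j; simp [pvS1]
    · intro j; simp [pvT1]
  | succ k ih =>
    intro hk1 A hA
    obtain ⟨hPl, hSl, hTl, hPs, hSs, hTs⟩ := ih (by omega) _ rfl
    have hkn : k < s.length := by omega
    have hkt : k < t.length := by omega
    have hcast : ((k + 1 : Nat) : Int) = (k : Int) + 1 := by push_cast; ring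
    rw [hcast, PySem.List.pyRange_one_succ_right (by positivity), List.foldl_append,
        List.foldl_cons, List.foldl_nil] at hA
    set Ak := (PySem.List.pyRange 0 (k : Int) 1).foldl pvGen1Step
                (List.replicate s.length ' ', s, t) with hAk
    have hSk : PySem.List.pyGetD Ak.2.1 (k : Int) ' ' = s.getD k ' ' := by
      rw [PySem.List.pyGetD_natCast, hSs k]; simp [pvS1]
    have hTk : PySem.List.pyGetD Ak.2.2 (k : Int) ' ' = t.getD k ' ' := by
      rw [PySem.List.pyGetD_natCast, hTs k]; simp [pvT1]
    by_cases hh : pvHit s t k = true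
    · -- a hit at position k
      have hEq : s.getD k ' ' = t.getD k ' ' := by
        have := hh; unfold pvHit at this; exact beq_iff_eq.mp this
      have hA' : A = (Ak.1.set k 'g', Ak.2.1.set k ' ', Ak.2.2.set k ' ') := by
        rw [hA]
        simp only [pvGen1Step, hSk, hTk, hEq, beq_self_eq_true, if_true,
          PySem.List.slice_zero_start]
        rw [pvBlank_eq_set Ak.2.1 _ (by positivity) (by simpa [hSl] using hkn),
            pvBlank_eq_set Ak.2.2 _ (by positivity) (by simpa [hTl] using hkt),
            PySem.List.pySetD_natCast]
        simp
      rw [hA']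
      refine ⟨by simpa using hPl, by simpa using hSl, by simpa using hTl, ?_, ?_, ?_⟩
      · intro j
        rw [pvGetD_set, hPs j]
        by_cases hj : j = k
        · subst hj; simp [pvP1, hPl, hkn, hh]
        · rw [if_neg (by simp [Ne.symm hj])]
          simp only [pvP1]
          have : (j < k + 1 ∧ pvHit s t j = true) ↔ (j < k ∧ pvHit s t j = true) := by
            constructor
            · rintro ⟨h1, h2⟩; exact ⟨by omega, h2⟩
            · rintro ⟨h1, h2⟩; exact ⟨by omega, h2⟩
          simp only [this]
      · intro j
        rw [pvGetD_set, hSs j]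
        by_cases hj : j = k
        · subst hj; simp [pvS1, hSl, hkn, hh]
        · rw [if_neg (by simp [Ne.symm hj])]
          simp only [pvS1]
          have : (j < k + 1 ∧ pvHit s t j = true) ↔ (j < k ∧ pvHit s t j = true) := by
            constructor
            · rintro ⟨h1, h2⟩; exact ⟨by omega, h2⟩
            · rintro ⟨h1, h2⟩; exact ⟨by omega, h2⟩
          simp only [this]
      · intro j
        rw [pvGetD_set, hTs j]
        by_cases hj : j = k
        · subst hj; simp [pvT1, hTl, hkt, hh]
        · rw [if_neg (by simp [Ne.symm hj])]
          simp only [pvT1]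
          have : (j < k + 1 ∧ pvHit s t j = true) ↔ (j < k ∧ pvHit s t j = true) := by
            constructor
            · rintro ⟨h1, h2⟩; exact ⟨by omega, h2⟩
            · rintro ⟨h1, h2⟩; exact ⟨by omega, h2⟩
          simp only [this]
    · -- no hit at position k
      have hNe : ¬ s.getD k ' ' = t.getD k ' ' := by
        intro hcc
        exact hh (by unfold pvHit; exact beq_iff_eq.mpr hcc)
      have hbeq : (s.getD k ' ' == t.getD k ' ') = false := by
        simp only [beq_eq_false_iff_ne, ne_eq]; exact hNe
      have hA' : A = Ak := by
        rw [hA]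
        simp only [pvGen1Step, hSk, hTk, hbeq, Bool.false_eq_true, if_false]
      have hhf : pvHit s t k = false := by
        simp only [pvHit]; exact hbeq
      rw [hA']
      refine ⟨hPl, hSl, hTl, ?_, ?_, ?_⟩
      · intro j
        rw [hPs j]
        simp only [pvP1]
        by_cases hj : j = k
        · subst hj; simp [hhf]
        · have : (j < k + 1 ∧ pvHit s t j = true) ↔ (j < k ∧ pvHit s t j = true) := by
            constructor
            · rintro ⟨h1, h2⟩; exact ⟨by omega, h2⟩
            · rintro ⟨h1, h2⟩; exact ⟨by omega, h2⟩
          simp only [this]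
      · intro j
        rw [hSs j]
        simp only [pvS1]
        by_cases hj : j = k
        · subst hj; simp [hhf]
        · have : (j < k + 1 ∧ pvHit s t j = true) ↔ (j < k ∧ pvHit s t j = true) := by
            constructor
            · rintro ⟨h1, h2⟩; exact ⟨by omega, h2⟩
            · rintro ⟨h1, h2⟩; exact ⟨by omega, h2⟩
          simp only [this]
      · intro j
        rw [hTs j]
        simp only [pvT1]
        by_cases hj : j = k
        · subst hj; simp [hhf]
        · have : (j < k + 1 ∧ pvHit s t j = true) ↔ (j < k ∧ pvHit s t j = true) := by
            constructor
            · rintro ⟨h1, h2⟩; exact ⟨by omega, h2⟩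
            · rintro ⟨h1, h2⟩; exact ⟨by omega, h2⟩
          simp only [this]

-- ===== phase 2, A side: the second loop writes the expected stream =====
lemma pvPhase2A (S1 : List Char) :
    ∀ (k : Nat), k ≤ S1.length → ∀ (P T : List Char), P.length = S1.length →
    (∀ j, k ≤ j → j < S1.length → S1.getD j ' ' = ' ' → P.getD j ' ' = 'g') →
    ((PySem.List.pyRange (k : Int) (S1.length : Int) 1).foldl (pvGen2Step S1) (P, T)).1
      = P.take k ++ pvExpected (S1.drop k) T := by
  suffices H : ∀ (m k : Nat), S1.length - k = m → k ≤ S1.length → ∀ (P T : List Char),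
      P.length = S1.length →
      (∀ j, k ≤ j → j < S1.length → S1.getD j ' ' = ' ' → P.getD j ' ' = 'g') →
      ((PySem.List.pyRange (k : Int) (S1.length : Int) 1).foldl (pvGen2Step S1) (P, T)).1
        = P.take k ++ pvExpected (S1.drop k) T by
    intro k hk; exact H (S1.length - k) k rfl hk
  intro m
  induction m with
  | zero =>
    intro k hm hk P T hlen hP
    have hk' : k = S1.length := by omega
    subst hk'
    rw [PySem.List.pyRange_one_eq_nil (le_refl _), List.drop_length]
    simp [pvExpected, List.take_of_length_le (le_of_eq hlen)]
  | succ m ih =>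
    intro k hm hk P T hlen hP
    have hklt : k < S1.length := by omega
    have hkP : k < P.length := by omega
    rw [PySem.List.pyRange_one_cons (by exact_mod_cast hklt), List.foldl_cons]
    rw [List.drop_eq_getElem_cons hklt]
    have hS1k : PySem.List.pyGetD S1 (k : Int) ' ' = S1[k] := by
      simp [List.getD_eq_getElem?_getD, List.getElem?_eq_getElem hklt]
    have hS1kD : S1.getD k ' ' = S1[k] := by
      simp [List.getD_eq_getElem?_getD, List.getElem?_eq_getElem hklt]
    have htake : ∀ (v : Char), (P.set k v).take (k + 1) = P.take k ++ [v] := by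
      intro v
      rw [List.take_add_one, List.take_set, List.set_eq_of_length_le (by simp),
          List.getElem?_set_self (by omega)]
      simp
    have hcast : ((k : Int) + 1) = ((k + 1 : Nat) : Int) := by push_cast; ring
    by_cases hsp : S1[k] = ' '
    · -- hit position: step leaves the state unchanged, expected hint is 'g'
      have hstep : pvGen2Step S1 (P, T) (k : Int) = (P, T) := by
        simp [pvGen2Step, hS1k, hsp]
      rw [hstep, hcast, ih (k + 1) (by omega) (by omega) P T hlen
            (fun j hj1 hj2 hj3 => hP j (by omega) hj2 hj3)]
      have hPk : P.getD k ' ' = P[k] := by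
        simp [List.getD_eq_getElem?_getD, List.getElem?_eq_getElem hkP]
      have hPg : P[k] = 'g' := by
        rw [← hPk]; exact hP k (le_refl _) hklt (by rw [hS1kD, hsp])
      rw [show P.take (k + 1) = P.take k ++ [P[k]] by
            rw [List.take_add_one, List.getElem?_eq_getElem hkP]; simp]
      simp [pvExpected, hsp, hPg]
    · -- non-hit: branch on whether the letter is still available in t
      by_cases hfind : PySem.Chars.find T [S1[k]] = -1
      · have hstep : pvGen2Step S1 (P, T) (k : Int) = (P.set k 'b', T) := by
          simp [pvGen2Step, hS1k, hsp, hfind, PySem.List.pySetD_natCast]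
        rw [hstep, hcast, ih (k + 1) (by omega) (by omega) (P.set k 'b') T (by simpa using hlen)
              (fun j hj1 hj2 hj3 => by
                rw [pvGetD_set]
                rw [if_neg (by omega)]
                exact hP j (by omega) hj2 hj3)]
        rw [htake 'b']
        simp [pvExpected, hsp, hfind]
      · obtain ⟨hge, hlt, hval⟩ := pvFind_spec S1[k] T hfind
        have hstep : pvGen2Step S1 (P, T) (k : Int)
            = (P.set k 'y', T.set (PySem.Chars.find T [S1[k]]).toNat ' ') := by
          simp only [pvGen2Step, hS1k]
          rw [if_pos hsp, if_pos hfind, PySem.List.pySetD_natCast,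
              pvBlank_eq_set T _ hge hlt]
        rw [hstep, hcast, ih (k + 1) (by omega) (by omega) (P.set k 'y') _ (by simpa using hlen)
              (fun j hj1 hj2 hj3 => by
                rw [pvGetD_set]
                rw [if_neg (by omega)]
                exact hP j (by omega) hj2 hj3)]
        rw [htake 'y']
        simp [pvExpected, hsp, hfind]

-- A's comparison loop is pvCmp
lemma pvVerifyA (pat p : List Char) :
    ∀ (k : Nat), k ≤ p.length →
    pvVerifyLoop pat p (PySem.List.pyRange (k : Int) (p.length : Int) 1)
      = pvCmp pat (k : Int) (p.drop k) := by
  suffices H : ∀ (m k : Nat), p.length - k = m → k ≤ p.length →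
      pvVerifyLoop pat p (PySem.List.pyRange (k : Int) (p.length : Int) 1)
        = pvCmp pat (k : Int) (p.drop k) by
    intro k hk; exact H (p.length - k) k rfl hk
  intro m
  induction m with
  | zero =>
    intro k hm hk
    have hk' : k = p.length := by omega
    subst hk'
    rw [PySem.List.pyRange_one_eq_nil (le_refl _), List.drop_length]
    rfl
  | succ m ih =>
    intro k hm hk
    have hklt : k < p.length := by omega
    rw [PySem.List.pyRange_one_cons (by exact_mod_cast hklt)]
    rw [List.drop_eq_getElem_cons hklt]
    have hpk : PySem.List.pyGetD p (k : Int) ' ' = p[k] := by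
      simp [PySem.List.pyGetD_natCast, List.getD_eq_getElem?_getD,
            List.getElem?_eq_getElem hklt]
    simp only [pvVerifyLoop, pvCmp, hpk]
    have hc : (k : Int) + 1 = ((k + 1 : Nat) : Int) := by push_cast; ring
    rw [hc, ih (k + 1) (by omega) (by omega)]

-- ===== the closed form of the expected stream =====
lemma pvCountP_range_succ_shift (p : Nat → Bool) (i : Nat) :
    (List.range (i + 1)).countP p
      = (if p 0 then 1 else 0) + (List.range i).countP (fun j => p (j + 1)) := by
  rw [List.range_succ_eq_map, List.countP_cons, List.countP_map]
  have h : (p ∘ Nat.succ) = (fun j => p (j + 1)) := rfl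
  rw [h, Nat.add_comm]

lemma pvExpected_getD (s' : List Char) :
    ∀ (T : List Char) (i : Nat), i < s'.length →
    (pvExpected s' T).getD i ' ' =
      if s'.getD i ' ' = ' ' then 'g'
      else if (((List.range (i+1)).countP (fun j => s'.getD j ' ' == s'.getD i ' ')) : Int)
              ≤ (T.count (s'.getD i ' ') : Int) then 'y' else 'b' := by
  induction s' with
  | nil => intro T i hi; simp at hi
  | cons a rest ih =>
    intro T i hi
    by_cases ha : a = ' '
    · subst ha
      rw [show pvExpected (' ' :: rest) T = 'g' :: pvExpected rest T from by
            simp [pvExpected]]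
      cases i with
      | zero => simp
      | succ i =>
        have hi' : i < rest.length := by simpa using hi
        rw [List.getD_cons_succ, ih T i hi', List.getD_cons_succ]
        by_cases hd : rest.getD i ' ' = ' '
        · rw [if_pos hd, if_pos hd]
        · rw [if_neg hd, if_neg hd]
          rw [pvCountP_range_succ_shift (fun j => (' ' :: rest).getD j ' ' == rest.getD i ' ') (i + 1)]
          simp only [List.getD_cons_succ, List.getD_cons_zero]
          have h0 : (' ' == rest.getD i ' ') = false := beq_eq_false_iff_ne.mpr (Ne.symm hd)
          rw [h0]
          simp
    · by_cases hfind : PySem.Chars.find T [a] = -1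
      · rw [show pvExpected (a :: rest) T = 'b' :: pvExpected rest T from by
              simp [pvExpected, ha, hfind]]
        cases i with
        | zero =>
          rw [List.getD_cons_zero, List.getD_cons_zero, if_neg ha]
          have hcnt : (List.range 1).countP (fun j => (a :: rest).getD j ' ' == (a :: rest).getD 0 ' ') = 1 := by
            simp [List.range_one]
          rw [List.getD_cons_zero] at hcnt
          rw [hcnt]
          have hTc : T.count a = 0 := List.count_eq_zero.mpr ((pvFind_none a T).mp hfind)
          rw [hTc, if_neg (by norm_num)]
        | succ i =>
          have hi' : i < rest.length := by simpa using hi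
          rw [List.getD_cons_succ, ih T i hi', List.getD_cons_succ]
          by_cases hd : rest.getD i ' ' = ' '
          · rw [if_pos hd, if_pos hd]
          · rw [if_neg hd, if_neg hd]
            rw [pvCountP_range_succ_shift (fun j => (a :: rest).getD j ' ' == rest.getD i ' ') (i + 1)]
            simp only [List.getD_cons_succ, List.getD_cons_zero]
            by_cases had : a = rest.getD i ' '
            · have hTc : T.count (rest.getD i ' ') = 0 := by
                rw [← had]; exact List.count_eq_zero.mpr ((pvFind_none a T).mp hfind)
              have hr : 0 < (List.range (i + 1)).countP (fun j => rest.getD j ' ' == rest.getD i ' ') :=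
                List.countP_pos_iff.mpr ⟨i, List.mem_range.mpr (by omega), by simp⟩
              have hbe : (a == rest.getD i ' ') = true := beq_iff_eq.mpr had
              rw [hbe, hTc]
              rw [if_neg (by push_cast; omega), if_neg (by push_cast; omega)]
            · have hbe : (a == rest.getD i ' ') = false := beq_eq_false_iff_ne.mpr had
              rw [hbe]
              simp
      · obtain ⟨hge, hlt, hval⟩ := pvFind_spec a T hfind
        rw [show pvExpected (a :: rest) T
              = 'y' :: pvExpected rest (T.set (PySem.Chars.find T [a]).toNat ' ') from by
              simp [pvExpected, ha, hfind]]
        cases i with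
        | zero =>
          rw [List.getD_cons_zero, List.getD_cons_zero, if_neg ha]
          have hmem : a ∈ T := by
            rw [← hval, List.getD_eq_getElem?_getD, List.getElem?_eq_getElem hlt]
            exact List.getElem_mem hlt
          have hTc : 0 < T.count a := List.count_pos_iff.mpr hmem
          have hcnt : (List.range 1).countP (fun j => (a :: rest).getD j ' ' == (a :: rest).getD 0 ' ') = 1 := by
            simp [List.range_one]
          rw [List.getD_cons_zero] at hcnt
          rw [hcnt, if_pos (by push_cast; omega)]
        | succ i =>
          have hi' : i < rest.length := by simpa using hi
          rw [List.getD_cons_succ, ih _ i hi', List.getD_cons_succ]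
          by_cases hd : rest.getD i ' ' = ' '
          · rw [if_pos hd, if_pos hd]
          · rw [if_neg hd, if_neg hd]
            have hset : (((T.set (PySem.Chars.find T [a]).toNat ' ').count (rest.getD i ' ') : Nat) : Int)
                = (T.count (rest.getD i ' ') : Int) - (if a = rest.getD i ' ' then 1 else 0) := by
              rw [pvCount_set T _ hlt _ hd, hval]
            rw [hset]
            rw [pvCountP_range_succ_shift (fun j => (a :: rest).getD j ' ' == rest.getD i ' ') (i + 1)]
            simp only [List.getD_cons_succ, List.getD_cons_zero]
            by_cases had : a = rest.getD i ' '
            · have hbe : (a == rest.getD i ' ') = true := beq_iff_eq.mpr had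
              rw [hbe, if_pos had]
              rw [show (if true = true then (1 : Nat) else 0) = 1 from rfl]
              exact if_congr (by push_cast; omega) rfl rfl
            · have hbe : (a == rest.getD i ' ') = false := beq_eq_false_iff_ne.mpr had
              rw [hbe, if_neg had]
              rw [show (if false = true then (1 : Nat) else 0) = 0 from rfl]
              simp

-- pvCmp is the pointwise prefix comparison
lemma pvCmp_iff (pat : List Char) :
    ∀ (E : List Char) (k : Nat),
    pvCmp pat (k : Int) E = true ↔ ∀ i < E.length, pat.getD (k + i) ' ' = E.getD i ' ' := by
  intro E
  induction E with
  | nil => intro k; simp [pvCmp]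
  | cons x rest ih =>
    intro k
    simp only [pvCmp, PySem.List.pyGetD_natCast]
    by_cases h : pat.getD k ' ' = x
    · rw [if_neg (not_not_intro h)]
      have hc : (k : Int) + 1 = ((k + 1 : Nat) : Int) := by push_cast; ring
      rw [hc, ih (k + 1)]
      constructor
      · intro H i hi
        cases i with
        | zero => rw [Nat.add_zero, List.getD_cons_zero]; exact h
        | succ i =>
          rw [List.getD_cons_succ, show k + (i + 1) = (k + 1) + i by omega]
          exact H i (by simpa using hi)
      · intro H i hi
        have h1 := H (i + 1) (by simpa using hi)
        rw [List.getD_cons_succ, show k + (i + 1) = (k + 1) + i by omega] at h1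
        exact h1
    · rw [if_pos h]
      simp only [Bool.false_eq_true, false_iff]
      intro H
      have h0 := H 0 (by simp)
      rw [Nat.add_zero, List.getD_cons_zero] at h0
      exact h h0

-- ===== B side: quota fold =====
lemma pvQuotaFold (s t : List Char) :
    ∀ (m : Nat) (c : Char),
    (((PySem.List.pyRange 0 (m : Int) 1).foldl (pvQuotaStep s t (s.length : Int))
        PySem.Dict.empty).getD c 0)
      = (((List.range m).countP (fun j =>
          (decide (s.length ≤ j) || !(s.getD j ' ' == t.getD j ' ')) && (t.getD j ' ' == c))) : Int) := by
  intro m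
  induction m with
  | zero =>
    intro c
    rw [PySem.List.pyRange_one_eq_nil (by simp), List.foldl_nil]
    simp [PySem.Dict.getD_empty]
  | succ m ih =>
    intro c
    have hcast : ((m + 1 : Nat) : Int) = (m : Int) + 1 := by push_cast; ring
    rw [hcast, PySem.List.pyRange_one_succ_right (by positivity), List.foldl_append,
        List.foldl_cons, List.foldl_nil, List.range_succ, List.countP_append,
        List.countP_singleton]
    have hcond : (decide ((s.length : Int) ≤ (m : Int))
          || !(PySem.List.pyGetD s (m : Int) ' ' == PySem.List.pyGetD t (m : Int) ' '))
        = (decide (s.length ≤ m) || !(s.getD m ' ' == t.getD m ' ')) := by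
      rw [PySem.List.pyGetD_natCast, PySem.List.pyGetD_natCast]
      simp
    simp only [pvQuotaStep, hcond]
    cases hc : (decide (s.length ≤ m) || !(s.getD m ' ' == t.getD m ' ')) with
    | false =>
      rw [if_neg (by simp)]
      rw [ih c]
      simp
    | true =>
      rw [if_pos (by simp)]
      rw [PySem.List.pyGetD_natCast, PySem.Dict.getD_insert]
      by_cases he : c = t.getD m ' '
      · rw [if_pos he, ih (t.getD m ' ')]
        rw [he]
        simp
      · rw [if_neg he, ih c]
        have hbe : (t.getD m ' ' == c) = false := beq_eq_false_iff_ne.mpr (Ne.symm he)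
        rw [hbe]
        simp

-- ===== B side: runs loop =====
lemma pvRunsLoop_spec (pat s t : List Char) :
    ∀ (fuel k : Nat), s.length - k = fuel → k ≤ s.length →
    ∀ (runs : PySem.Dict Char (List Char)),
    (∀ c, runs.getD c [] = pvRun pat s t k c) →
    ((∀ i, k ≤ i → i < s.length → pvPosOK pat s t i = true) →
      ∃ R, pvRunsLoop pat s t runs (PySem.List.pyRange (k : Int) (s.length : Int) 1) = some R ∧
           ∀ c, R.getD c [] = pvRun pat s t s.length c)
    ∧ ((¬ ∀ i, k ≤ i → i < s.length → pvPosOK pat s t i = true) →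
      pvRunsLoop pat s t runs (PySem.List.pyRange (k : Int) (s.length : Int) 1) = none) := by
  intro fuel
  induction fuel with
  | zero =>
    intro k hm hk runs hruns
    have hk' : k = s.length := by omega
    subst hk'
    rw [PySem.List.pyRange_one_eq_nil (le_refl _)]
    constructor
    · intro _
      exact ⟨runs, rfl, hruns⟩
    · intro hno
      exact absurd (fun i hi1 hi2 => absurd hi2 (by omega)) hno
  | succ fuel ih =>
    intro k hm hk runs hruns
    have hklt : k < s.length := by omega
    rw [PySem.List.pyRange_one_cons (by exact_mod_cast hklt)]
    have hcast : (k : Int) + 1 = ((k + 1 : Nat) : Int) := by push_cast; ring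
    simp only [pvRunsLoop, PySem.List.pyGetD_natCast]
    by_cases hhit : pvHit s t k = true
    · rw [if_pos (by exact hhit)]
      by_cases hg : pat.getD k ' ' = 'g'
      · rw [if_neg (not_not_intro hg)]
        have hrun1 : ∀ c, pvRun pat s t (k + 1) c = pvRun pat s t k c := by
          intro c
          unfold pvRun
          rw [List.range_succ, List.filter_append]
          simp [pvNG, hhit]
        rw [hcast]
        obtain ⟨H1, H2⟩ := ih (k + 1) (by omega) (by omega) runs
          (fun c => (hruns c).trans (hrun1 c).symm)
        constructor
        · intro hall
          exact H1 (fun i hi1 hi2 => hall i (by omega) hi2)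
        · intro hno
          apply H2
          intro hall'
          apply hno
          intro i hi1 hi2
          rcases Nat.eq_or_lt_of_le hi1 with h | h
          · subst h
            unfold pvPosOK
            rw [if_pos hhit, hg]
            exact beq_self_eq_true _
          · exact hall' i (by omega) hi2
      · rw [if_pos hg]
        constructor
        · intro hall
          exfalso
          have := hall k (le_refl _) hklt
          unfold pvPosOK at this
          rw [if_pos hhit] at this
          exact hg (beq_iff_eq.mp this)
        · intro _; rfl
    · have hhitf : (s.getD k ' ' == t.getD k ' ') = false := by
        unfold pvHit at hhit
        exact Bool.not_eq_true _ ▸ Bool.eq_false_iff.mpr hhit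
      rw [if_neg (by rw [hhitf]; exact Bool.false_ne_true)]
      by_cases hyb : pat.getD k ' ' ≠ 'y' ∧ pat.getD k ' ' ≠ 'b'
      · rw [if_pos hyb]
        constructor
        · intro hall
          exfalso
          have := hall k (le_refl _) hklt
          unfold pvPosOK at this
          rw [if_neg hhit] at this
          rcases Bool.or_eq_true_iff.mp this with h | h
          · exact hyb.1 (beq_iff_eq.mp h)
          · exact hyb.2 (beq_iff_eq.mp h)
        · intro _; rfl
      · rw [if_neg hyb]
        have hrun1 : ∀ c, pvRun pat s t (k + 1) c
            = pvRun pat s t k c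
              ++ (if (s.getD k ' ' == c) = true then [pat.getD k ' '] else []) := by
          intro c
          unfold pvRun
          rw [List.range_succ, List.filter_append, List.map_append]
          congr 1
          have hng : pvNG s t c k = (s.getD k ' ' == c) := by
            unfold pvNG pvHit
            rw [hhitf]
            rfl
          rw [List.filter_singleton, hng]
          cases hcc : (s.getD k ' ' == c) <;> simp
        have hruns' : ∀ c, (runs.modify (s.getD k ' ') [] (· ++ [pat.getD k ' '])).getD c []
            = pvRun pat s t (k + 1) c := by
          intro c
          rw [PySem.Dict.getD_modify, hrun1 c]
          by_cases he : c = s.getD k ' '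
          · rw [if_pos he, hruns, he, show (s.getD k ' ' == s.getD k ' ') = true from beq_self_eq_true _]
            simp
          · rw [if_neg he, hruns,
                show (s.getD k ' ' == c) = false from beq_eq_false_iff_ne.mpr (Ne.symm he)]
            simp
        rw [hcast]
        obtain ⟨H1, H2⟩ := ih (k + 1) (by omega) (by omega) _ hruns'
        constructor
        · intro hall
          exact H1 (fun i hi1 hi2 => hall i (by omega) hi2)
        · intro hno
          apply H2
          intro hall'
          apply hno
          intro i hi1 hi2
          rcases Nat.eq_or_lt_of_le hi1 with h | h
          · subst h
            unfold pvPosOK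
            rw [if_neg hhit]
            rcases not_and_or.mp hyb with h | h
            · rw [not_not.mp h]
              simp
            · rw [not_not.mp h]
              simp
          · exact hall' i (by omega) hi2

-- ===== B side: law loop =====
lemma pvLawLoop_iff (q : PySem.Dict Char Int) (runs : PySem.Dict Char (List Char)) :
    ∀ (keys : List Char),
    pvLawLoop q runs keys = true ↔
      ∀ c ∈ keys,
        runs.getD c [] =
          List.replicate (min (q.getD c 0) (((runs.getD c []).length : Int))).toNat 'y'
            ++ List.replicate ((((runs.getD c []).length : Int))
                  - min (q.getD c 0) (((runs.getD c []).length : Int))).toNat 'b' := by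
  intro keys
  induction keys with
  | nil => simp [pvLawLoop]
  | cons c cs ih =>
    simp only [pvLawLoop]
    split
    · rename_i hne
      simp only [Bool.false_eq_true, false_iff]
      intro H
      exact hne (H c (List.mem_cons_self ..))
    · rename_i heq
      rw [ih]
      constructor
      · intro H d hd
        rcases List.mem_cons.mp hd with h | h
        · subst h; exact not_not.mp heq
        · exact H d h
      · intro H d hd
        exact H d (List.mem_cons_of_mem _ hd)

-- rank of a filtered position: counting the predicate up to the d-th filtered element
lemma pvRank (p : Nat → Bool) :
    ∀ (n d : Nat) (hd : d < ((List.range n).filter p).length),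
    (List.range ((((List.range n).filter p)[d]) + 1)).countP p = d + 1 := by
  intro n
  induction n with
  | zero => intro d hd; simp at hd
  | succ n ih =>
    intro d hd
    have hsplit : (List.range (n + 1)).filter p
        = (List.range n).filter p ++ List.filter p [n] := by
      rw [List.range_succ, List.filter_append]
    rw [hsplit] at hd
    simp only [hsplit]
    by_cases hdl : d < ((List.range n).filter p).length
    · rw [List.getElem_append_left hdl]
      exact ih d hdl
    · cases hpn : p n with
      | false =>
        exfalso
        rw [List.length_append] at hd
        simp [hpn] at hd
        omega
      | true =>
        have hfl : List.filter p [n] = [n] := by simp [hpn]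
        simp only [hfl] at hd ⊢
        rw [List.length_append, List.length_singleton] at hd
        have hd' : d = ((List.range n).filter p).length := by omega
        rw [List.getElem_append_right (by omega)]
        simp only [hd', Nat.sub_self, List.getElem_singleton]
        rw [List.range_succ, List.countP_append]
        rw [List.countP_eq_length_filter]
        simp [hpn]

-- element of a 'y'-block followed by a 'b'-block
lemma pvRepGet (a b d : Nat) (hd : d < (List.replicate a 'y' ++ List.replicate b 'b').length) :
    (List.replicate a 'y' ++ List.replicate b 'b')[d] = if d < a then 'y' else 'b' := by
  by_cases h : d < a
  · rw [List.getElem_append_left (by simpa using h), List.getElem_replicate, if_pos h]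
  · have hb : d - a < b := by
      simp only [List.length_append, List.length_replicate] at hd
      omega
    rw [List.getElem_append_right (by simpa using h), List.getElem_replicate, if_neg h]

-- ===== the combinatorial heart: pointwise agreement with A's hints ↔ B's per-letter law =====
lemma pvPointwise_iff_law (pat s t : List Char) :
    (∀ i < s.length, pat.getD i ' ' = pvExpChar s t i) ↔
      ((∀ i < s.length, pvPosOK pat s t i = true) ∧
       (∀ c, pvRun pat s t s.length c =
          List.replicate (min (pvQ s t c) (((pvRun pat s t s.length c).length : Int))).toNat 'y'
            ++ List.replicate ((((pvRun pat s t s.length c).length : Int))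
                  - min (pvQ s t c) (((pvRun pat s t s.length c).length : Int))).toNat 'b')) := by
  have hlenrun : ∀ c, (pvRun pat s t s.length c).length
      = ((List.range s.length).filter (pvNG s t c)).length := by
    intro c; simp [pvRun]
  have hmemL : ∀ c d (hd : d < ((List.range s.length).filter (pvNG s t c)).length),
      ((List.range s.length).filter (pvNG s t c))[d] < s.length ∧
        pvNG s t c (((List.range s.length).filter (pvNG s t c))[d]) = true := by
    intro c d hd
    have hm := List.getElem_mem hd
    rcases List.mem_filter.mp hm with ⟨hr, hp⟩
    exact ⟨List.mem_range.mp hr, hp⟩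
  have hrunget : ∀ c d (hd : d < ((List.range s.length).filter (pvNG s t c)).length),
      (pvRun pat s t s.length c)[d]'(by rw [hlenrun]; exact hd)
        = pat.getD (((List.range s.length).filter (pvNG s t c))[d]) ' ' := by
    intro c d hd
    simp [pvRun]
  have hq0 : ∀ c, 0 ≤ pvQ s t c := fun c => Int.natCast_nonneg _
  constructor
  · intro hP
    constructor
    · intro i hi
      have h := hP i hi
      unfold pvPosOK
      unfold pvExpChar at h
      by_cases hhit : pvHit s t i = true
      · rw [if_pos hhit] at h ⊢
        rw [h]
        exact beq_self_eq_true _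
      · rw [if_neg hhit] at h ⊢
        rw [h]
        split <;> rfl
    · intro c
      apply List.ext_getElem
      · simp only [List.length_append, List.length_replicate]
        have := hq0 c
        omega
      · intro d hd1 hd2
        rw [pvRepGet _ _ _ hd2]
        have hdL : d < ((List.range s.length).filter (pvNG s t c)).length := by
          rw [← hlenrun]; exact hd1
        rw [hrunget c d hdL]
        have hiprops := hmemL c d hdL
        have h := hP _ hiprops.1
        have hng := hiprops.2
        unfold pvNG at hng
        rcases Bool.and_eq_true_iff.mp hng with ⟨hh1, hh2⟩
        have hhitf : pvHit s t (((List.range s.length).filter (pvNG s t c))[d]) = false := by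
          simpa using hh1
        have hceq : s.getD (((List.range s.length).filter (pvNG s t c))[d]) ' ' = c :=
          beq_iff_eq.mp hh2
        unfold pvExpChar at h
        rw [if_neg (by rw [hhitf]; exact Bool.false_ne_true), hceq] at h
        rw [pvRank (pvNG s t c) s.length d hdL] at h
        rw [h]
        have hdk : d < (pvRun pat s t s.length c).length := hd1
        exact if_congr (by push_cast; omega) rfl rfl
  · rintro ⟨hpos, hlaw⟩ i hi
    unfold pvExpChar
    by_cases hhit : pvHit s t i = true
    · rw [if_pos hhit]
      have h := hpos i hi
      unfold pvPosOK at h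
      rw [if_pos hhit] at h
      exact beq_iff_eq.mp h
    · rw [if_neg hhit]
      have hhitf : pvHit s t i = false := Bool.eq_false_iff.mpr hhit
      have hngi : pvNG s t (s.getD i ' ') i = true := by
        unfold pvNG
        rw [hhitf]
        simp
      have hmem : i ∈ (List.range s.length).filter (pvNG s t (s.getD i ' ')) :=
        List.mem_filter.mpr ⟨List.mem_range.mpr hi, hngi⟩
      obtain ⟨d, hd, hdi⟩ := List.getElem_of_mem hmem
      have h1 : pat.getD i ' '
          = (pvRun pat s t s.length (s.getD i ' '))[d]'(by rw [hlenrun]; exact hd) := by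
        rw [hrunget _ d hd, hdi]
      rw [h1, List.getElem_of_eq (hlaw (s.getD i ' ')), pvRepGet _ _ _ (by
        rw [← hlaw (s.getD i ' '), hlenrun]; exact hd)]
      have hr := pvRank (pvNG s t (s.getD i ' ')) s.length d hd
      rw [hdi] at hr
      rw [hr]
      have hdk : d < (pvRun pat s t s.length (s.getD i ' ')).length := by
        rw [hlenrun]; exact hd
      exact if_congr (by push_cast; omega) rfl rfl

-- ===== VERDICT (by name: the statement is the Claim_ definition above) =====
theorem verify_pattern_spec : Claim_equal_verify_pattern := by
  intro pattern source target _ hpre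
  obtain ⟨hsp, hlen, -⟩ := hpre
  unfold Spec_verify_pattern verify_pattern generate_pattern
  dsimp only
  rw [show PySem.List.pyRepeat [' '] ((source.toList.length : Int))
        = List.replicate source.toList.length ' ' from by
      rw [PySem.List.pyRepeat_singleton]; simp]
  set s := source.toList with hs
  set t := target.toList with ht
  set pat := pattern.toList with hpat
  set St1 := (PySem.List.pyRange 0 (s.length : Int) 1).foldl pvGen1Step
      (List.replicate s.length ' ', s, t) with hSt1
  obtain ⟨hPl, hSl, hTl, hPs, hSs, hTs⟩ := pvPhase1 s t hlen s.length le_rfl St1 hSt1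
  -- A's second loop produces the expected stream
  have hPg : ∀ j, 0 ≤ j → j < St1.2.1.length → St1.2.1.getD j ' ' = ' ' →
      St1.1.getD j ' ' = 'g' := by
    intro j _ hj hsp1
    have hjn : j < s.length := by rwa [hSl] at hj
    rw [hSs j] at hsp1
    rw [hPs j]
    by_cases hhit : pvHit s t j = true
    · simp [pvP1, hjn, hhit]
    · exfalso
      have hm : s.getD j ' ' ∈ s := by
        rw [List.getD_eq_getElem?_getD, List.getElem?_eq_getElem hjn]
        exact List.getElem_mem hjn
      simp [pvS1, hhit] at hsp1
      exact hsp (hsp1 ▸ hm)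
  have hexp := pvPhase2A St1.2.1 0 (by omega) St1.1 St1.2.2 (by rw [hPl, hSl]) hPg
  simp only [Nat.cast_zero, List.take_zero, List.drop_zero, List.nil_append] at hexp
  rw [hSl] at hexp
  rw [hexp]
  -- the res loop copies the final pattern list
  have hlenE : (pvExpected St1.2.1 St1.2.2).length = s.length := by
    rw [pvExpected_length, hSl]
  have hres : (PySem.List.pyRange 0 (s.length : Int) 1).foldl
      (fun r i => r ++ [PySem.List.pyGetD (pvExpected St1.2.1 St1.2.2) i ' ']) []
      = pvExpected St1.2.1 St1.2.2 := by
    rw [show ((s.length : Int)) = ((pvExpected St1.2.1 St1.2.2).length : Int) from by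
          rw [hlenE]]
    rw [PySem.List.foldl_pyRange_zero_pyGetD' (pvExpected St1.2.1 St1.2.2) ' '
          (fun acc x => acc ++ [x]) []]
    rw [PySem.List.foldl_append_singleton]
    simp
  rw [hres]
  -- A's comparison loop is the pointwise prefix comparison
  have hva := pvVerifyA pat (pvExpected St1.2.1 St1.2.2) 0 (by omega)
  simp only [Nat.cast_zero, List.drop_zero] at hva
  rw [hva]
  -- E is the closed-form expected hint at every position
  have hTlist : St1.2.2 = (List.range t.length).map (fun j => pvT1 s t s.length j) := by
    apply List.ext_getElem
    · rw [hTl]; simp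
    · intro j hj1 hj2
      rw [List.getElem_map, List.getElem_range]
      have h := hTs j
      rwa [List.getD_eq_getElem?_getD, List.getElem?_eq_getElem hj1, Option.getD_some] at h
  have hTcount : ∀ c, c ≠ ' ' → (St1.2.2.count c : Int) = pvQ s t c := by
    intro c hc
    rw [hTlist, List.count_eq_countP, List.countP_map]
    unfold pvQ
    refine congrArg Nat.cast (List.countP_congr ?_)
    intro j _
    simp only [Function.comp]
    unfold pvT1 pvHit
    by_cases hj : j < s.length
    · by_cases hh : (s.getD j ' ' == t.getD j ' ') = true
      · rw [if_pos ⟨hj, hh⟩, hh,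
            show (' ' == c) = false from beq_eq_false_iff_ne.mpr (Ne.symm hc),
            show decide (s.length ≤ j) = false from decide_eq_false (by omega)]
        rfl
      · have hhf : (s.getD j ' ' == t.getD j ' ') = false := Bool.eq_false_iff.mpr hh
        rw [if_neg (fun hcc => hh hcc.2), hhf,
            show decide (s.length ≤ j) = false from decide_eq_false (by omega)]
        rfl
    · rw [if_neg (fun hcc => hj hcc.1),
          show decide (s.length ≤ j) = true from decide_eq_true (by omega)]
      rfl
  have hE : ∀ i, i < s.length → (pvExpected St1.2.1 St1.2.2).getD i ' ' = pvExpChar s t i := by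
    intro i hi
    rw [pvExpected_getD St1.2.1 St1.2.2 i (by rw [hSl]; exact hi)]
    by_cases hhit : pvHit s t i = true
    · have hS1i : St1.2.1.getD i ' ' = ' ' := by rw [hSs i]; simp [pvS1, hi, hhit]
      rw [if_pos hS1i]
      unfold pvExpChar
      rw [if_pos hhit]
    · have hS1i : St1.2.1.getD i ' ' = s.getD i ' ' := by rw [hSs i]; simp [pvS1, hhit]
      have hsmem : s.getD i ' ' ∈ s := by
        rw [List.getD_eq_getElem?_getD, List.getElem?_eq_getElem hi]
        exact List.getElem_mem hi
      have hsc : s.getD i ' ' ≠ ' ' := fun hcc => hsp (hcc ▸ hsmem)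
      rw [if_neg (by rw [hS1i]; exact hsc)]
      unfold pvExpChar
      rw [if_neg hhit, hS1i]
      have hcnt : (List.range (i + 1)).countP (fun j => St1.2.1.getD j ' ' == s.getD i ' ')
          = (List.range (i + 1)).countP (pvNG s t (s.getD i ' ')) := by
        apply List.countP_congr
        intro j hj
        have hji : j < s.length := by
          have := List.mem_range.mp hj
          omega
        rw [hSs j]
        unfold pvS1 pvNG pvHit
        by_cases hhj : (s.getD j ' ' == t.getD j ' ') = true
        · rw [if_pos ⟨hji, hhj⟩, hhj,
              show (' ' == s.getD i ' ') = false from beq_eq_false_iff_ne.mpr (Ne.symm hsc)]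
          rfl
        · have hhjf : (s.getD j ' ' == t.getD j ' ') = false := Bool.eq_false_iff.mpr hhj
          rw [if_neg (fun hcc => hhj hcc.2), hhjf]
          rfl
      rw [hcnt, hTcount _ hsc]
  -- the pointwise comparison on the A side
  have hLiff := pvCmp_iff pat (pvExpected St1.2.1 St1.2.2) 0
  simp only [Nat.cast_zero, Nat.zero_add] at hLiff
  -- the B side
  unfold verify_pattern_alt
  dsimp only
  obtain ⟨H1, H2⟩ := pvRunsLoop_spec pat s t s.length 0 (by omega) (by omega)
      PySem.Dict.empty (fun c => by simp [pvRun, PySem.Dict.getD_empty])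
  simp only [Nat.cast_zero] at H1 H2
  have hq : ∀ c, (((PySem.List.pyRange 0 ((t.length : Nat) : Int) 1).foldl
        (pvQuotaStep s t (s.length : Int)) PySem.Dict.empty).getD c 0) = pvQ s t c :=
    fun c => pvQuotaFold s t t.length c
  have hboih : ∀ (a b : Bool), (a = true ↔ b = true) → a = b := by decide
  by_cases hpos : ∀ i, 0 ≤ i → i < s.length → pvPosOK pat s t i = true
  · obtain ⟨R, hRsome, hRc⟩ := H1 hpos
    rw [hRsome]
    apply hboih
    constructor
    · intro hcmp
      have hP : ∀ i < s.length, pat.getD i ' ' = pvExpChar s t i := by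
        intro i hi
        have h := (hLiff.mp hcmp) i (by rw [hlenE]; exact hi)
        rw [h, hE i hi]
      have hlaw := ((pvPointwise_iff_law pat s t).mp hP).2
      rw [pvLawLoop_iff]
      intro c _
      rw [hRc c, hq c]
      exact hlaw c
    · intro hlawb
      have hlawall : ∀ c, pvRun pat s t s.length c =
          List.replicate (min (pvQ s t c) (((pvRun pat s t s.length c).length : Int))).toNat 'y'
            ++ List.replicate ((((pvRun pat s t s.length c).length : Int))
                  - min (pvQ s t c) (((pvRun pat s t s.length c).length : Int))).toNat 'b' := by
        intro c
        by_cases hck : c ∈ R.keys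
        · have h := (pvLawLoop_iff _ R R.keys).mp hlawb c hck
          rw [hRc c, hq c] at h
          exact h
        · have hcont : R.contains c = false := by
            cases hcc : R.contains c
            · rfl
            · exact absurd ((PySem.Dict.contains_iff_mem_keys R c).mp hcc) hck
          have hget : R.getD c [] = [] := PySem.Dict.getD_of_not_contains R [] hcont
          have hrun0 : pvRun pat s t s.length c = [] := by rw [← hRc c, hget]
          rw [hrun0]
          have hq0 : (0 : Int) ≤ pvQ s t c := Int.natCast_nonneg _
          rw [show min (pvQ s t c) (((List.length ([] : List Char)) : Nat) : Int) = 0 from by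
                simp only [List.length_nil, Nat.cast_zero]; omega]
          simp
      have hP := (pvPointwise_iff_law pat s t).mpr
        ⟨fun i hi => hpos i (by omega) hi, hlawall⟩
      apply hLiff.mpr
      intro i hi
      rw [hE i (by rw [← hlenE]; exact hi)]
      exact hP i (by rw [← hlenE]; exact hi)
  · rw [H2 hpos]
    cases hA : pvCmp pat 0 (pvExpected St1.2.1 St1.2.2)
    · rfl
    · exfalso
      have hP : ∀ i < s.length, pat.getD i ' ' = pvExpChar s t i := by
        intro i hi
        have h := (hLiff.mp hA) i (by rw [hlenE]; exact hi)
        rw [h, hE i hi]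
      exact hpos (fun i _ hi => ((pvPointwise_iff_law pat s t).mp hP).1 i hi)
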